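-- pv_equiv track=rewrite | github.com/1400015989menghu-lang/updatebeam | scripts/hasil_crawler.py | seed_pages_for_priority
-- ===== SOURCE A (Python) =====
-- from typing import Dict, Iterable, List, Optional, Sequence, Tuple
--
-- BASE_URL = "https://www.hasil.gov.my"
--
-- def seed_pages_for_priority(existing: Dict[str, str]) -> List[Tuple[str, str]]:
--     priority_urls = [
--         f"{BASE_URL}/en/announcement/",
--         f"{BASE_URL}/en/e-invoice/communication-and-publicity/media-release/",
--         f"{BASE_URL}/en/e-invoice/e-invoice-events/",
--         f"{BASE_URL}/en/e-invoice/communication-and-publicity/",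
--     ]
--     ordered: List[Tuple[str, str]] = []
--     for url in priority_urls:
--         if url in existing:
--             ordered.append((url, existing[url]))
--     for url, category in existing.items():
--         if url not in priority_urls:
--             ordered.append((url, category))
--     return ordered
-- ===== SOURCE B (Python) =====
-- from typing import Dict, List, Tuple
--
-- BASE_URL = "https://www.hasil.gov.my"
--
-- def seed_pages_for_priority(existing: Dict[str, str]) -> List[Tuple[str, str]]:
--     priority_urls = [
--         f"{BASE_URL}/en/announcement/",
--         f"{BASE_URL}/en/e-invoice/communication-and-publicity/media-release/",
--         f"{BASE_URL}/en/e-invoice/e-invoice-events/",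
--         f"{BASE_URL}/en/e-invoice/communication-and-publicity/",
--     ]
--     rank = {url: i for i, url in enumerate(priority_urls)}
--     prio: List[Tuple[str, str]] = []
--     rest: List[Tuple[str, str]] = []
--     for url, category in existing.items():
--         if url in rank:
--             prio.append((url, category))
--         else:
--             rest.append((url, category))
--     prio.sort(key=lambda p: rank[p[0]])
--     return prio + rest
-- ===== Notes on version B (the rewrite author's own statement) =====
-- stated objective: alternative
-- what changed: Instead of A's two scans (probe the dict once per priority URL, then re-scan all items against the priority list), B makes one pass over existing.items() splitting items into a priority bucket and a rest bucket via a rank table, then sorts the small priority bucket by rank and concatenates.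
import Mathlib
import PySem

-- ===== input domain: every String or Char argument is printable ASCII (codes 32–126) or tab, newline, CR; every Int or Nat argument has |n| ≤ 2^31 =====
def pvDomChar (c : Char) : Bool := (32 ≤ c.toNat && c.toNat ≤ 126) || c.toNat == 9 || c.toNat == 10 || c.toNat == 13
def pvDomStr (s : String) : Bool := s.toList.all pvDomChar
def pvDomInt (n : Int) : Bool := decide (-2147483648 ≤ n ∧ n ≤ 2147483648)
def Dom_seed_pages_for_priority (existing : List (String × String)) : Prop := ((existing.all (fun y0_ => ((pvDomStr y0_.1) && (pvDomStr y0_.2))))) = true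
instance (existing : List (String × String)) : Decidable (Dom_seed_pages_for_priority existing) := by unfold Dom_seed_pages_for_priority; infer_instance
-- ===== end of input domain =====

-- B replaces A's two scans (probe existing per priority URL, then re-scan existing against the
-- priority list) by ONE pass over existing.items() splitting into priority/rest buckets, the
-- priority bucket then sorted by a rank table; objective: alternative decomposition, same cost.

-- ===== PORT A =====
def pvPrioA : List String :=
  ["https://www.hasil.gov.my/en/announcement/",
   "https://www.hasil.gov.my/en/e-invoice/communication-and-publicity/media-release/",
   "https://www.hasil.gov.my/en/e-invoice/e-invoice-events/",
   "https://www.hasil.gov.my/en/e-invoice/communication-and-publicity/"]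

def seed_pages_for_priority (existing : List (String × String)) : List (String × String) :=
  let d := PySem.Dict.ofList existing
  let ordered := pvPrioA.foldl (fun acc url =>
      match d.get? url with                                   -- 'if url in existing: … existing[url]'
      | some v => acc ++ [(url, v)]
      | none => acc) ([] : List (String × String))
  d.items.foldl (fun acc p => if !(pvPrioA.contains p.1) then acc ++ [p] else acc) ordered

-- ===== PORT B =====
def pvPrioB : List String :=
  ["https://www.hasil.gov.my/en/announcement/",
   "https://www.hasil.gov.my/en/e-invoice/communication-and-publicity/media-release/",
   "https://www.hasil.gov.my/en/e-invoice/e-invoice-events/",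
   "https://www.hasil.gov.my/en/e-invoice/communication-and-publicity/"]

-- rank = {url: i for i, url in enumerate(priority_urls)}
def pvRankB : PySem.Dict String Int :=
  (PySem.List.enumerate pvPrioB 0).foldl (fun r p => r.insert p.2 p.1) PySem.Dict.empty

def seed_pages_for_priority_alt (existing : List (String × String)) : List (String × String) :=
  let d := PySem.Dict.ofList existing
  let pr := d.items.foldl
      (fun (pr : List (String × String) × List (String × String)) p =>
        if pvRankB.contains p.1 then (pr.1 ++ [p], pr.2) else (pr.1, pr.2 ++ [p]))
      ([], [])
  -- prio.sort(key=lambda p: rank[p[0]]); every key of pr.1 is in pvRankB, so getD's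
  -- default 0 is never the looked-up value (Python's rank[p[0]] never raises here)
  PySem.List.sorted pr.1 (fun p => pvRankB.getD p.1 0) false ++ pr.2

-- ===== PRECONDITION & SPEC =====
def Spec_seed_pages_for_priority (existing : List (String × String)) (out : List (String × String)) : Prop := out = seed_pages_for_priority_alt existing
instance (existing : List (String × String)) (out : List (String × String)) : Decidable (Spec_seed_pages_for_priority existing out) := by unfold Spec_seed_pages_for_priority; infer_instance

-- ===== CLAIM (what is proved, stated in full; the proofs are below) =====
def Claim_equal_seed_pages_for_priority : Prop := ∀ (existing : List (String × String)), Dom_seed_pages_for_priority existing → Spec_seed_pages_for_priority existing (seed_pages_for_priority existing)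

-- ===== LEMMAS AND PROOFS =====

-- the rank table and the priority list test the same keys
lemma rank_contains_eq (u : String) : pvRankB.contains u = pvPrioA.contains u := by
  have h : u ∈ pvPrioB ↔ u ∈ pvPrioA := by rfl
  rw [PySem.Dict.contains_eq_decide_mem_keys, List.contains_eq_mem]
  have hk : pvRankB.keys = pvPrioB := by decide
  rw [hk]
  simp [h]

-- A's first loop written as a filterMap over the priority list
lemma foldl_match_eq_filterMap (d : PySem.Dict String String) (P : List String)
    (acc : List (String × String)) :
    P.foldl (fun acc url => match d.get? url with
      | some v => acc ++ [(url, v)]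
      | none => acc) acc
    = acc ++ P.filterMap (fun u => (d.get? u).map (fun v => (u, v))) := by
  induction P generalizing acc with
  | nil => simp
  | cons u P ih => cases h : d.get? u <;> simp [h, ih]

lemma map_fst_A (d : PySem.Dict String String) (P : List String) :
    (P.filterMap (fun u => (d.get? u).map (fun v => (u, v)))).map Prod.fst
    = P.filter (fun u => (d.get? u).isSome) := by
  induction P with
  | nil => simp
  | cons u P ih => cases h : d.get? u <;> simp [h, ih]

lemma mem_A (d : PySem.Dict String String) (P : List String) (a : String × String) :
    a ∈ P.filterMap (fun u => (d.get? u).map (fun v => (u, v)))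
    ↔ a.1 ∈ P ∧ d.get? a.1 = some a.2 := by
  simp only [List.mem_filterMap, Option.map_eq_some_iff]
  constructor
  · rintro ⟨u, hu, v, hv, rfl⟩; exact ⟨hu, hv⟩
  · rintro ⟨h1, h2⟩; exact ⟨a.1, h1, a.2, h2, rfl⟩

-- B's sorted priority bucket IS A's first loop: the bucket is a permutation of A's
-- priority prefix and that prefix is strictly increasing under the rank key
lemma sorted_filter_eq (d : PySem.Dict String String) (hnd : d.keys.Nodup) :
    PySem.List.sorted (d.items.filter (fun p => decide (p.1 ∈ pvPrioA)))
      (fun p => pvRankB.getD p.1 0) false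
    = pvPrioA.filterMap (fun u => (d.get? u).map (fun v => (u, v))) := by
  have hPnd : pvPrioA.Nodup := by decide
  have hfstnd : ((pvPrioA.filterMap (fun u => (d.get? u).map (fun v => (u, v)))).map Prod.fst).Nodup := by
    rw [map_fst_A]; exact hPnd.filter _
  have hynd := List.Nodup.of_map _ hfstnd
  have hLnd : d.items.Nodup := List.Nodup.of_map Prod.fst hnd
  apply PySem.List.sorted_eq_of_perm_of_pairwise_lt
  · rw [List.perm_ext_iff_of_nodup hynd (hLnd.filter _)]
    intro a
    rw [mem_A, List.mem_filter,
        ← PySem.Dict.get?_eq_some_iff_mem_items d a.1 a.2 hnd]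
    simp [and_comm]
  · have hP : pvPrioA.Pairwise (fun a b => pvRankB.getD a 0 < pvRankB.getD b 0) := by decide
    have := List.pairwise_map.mp (by rw [map_fst_A]; exact hP.filter _ :
      ((pvPrioA.filterMap (fun u => (d.get? u).map (fun v => (u, v)))).map Prod.fst).Pairwise
        (fun a b => pvRankB.getD a 0 < pvRankB.getD b 0))
    exact this

theorem seed_main (existing : List (String × String)) :
    seed_pages_for_priority existing = seed_pages_for_priority_alt existing := by
  unfold seed_pages_for_priority seed_pages_for_priority_alt
  have hnd := PySem.Dict.nodup_keys_ofList existing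
  set d := PySem.Dict.ofList existing with hdd
  simp only []
  -- split B's single fold into its two bucket folds
  have hsplit : (fun (pr : List (String × String) × List (String × String)) (p : String × String) =>
        if pvRankB.contains p.1 then (pr.1 ++ [p], pr.2) else (pr.1, pr.2 ++ [p]))
      = fun pr p => ((fun acc p => if pvRankB.contains p.1 then acc ++ [p] else acc) pr.1 p,
                     (fun acc p => if !pvRankB.contains p.1 then acc ++ [p] else acc) pr.2 p) := by
    funext pr p
    by_cases h : pvRankB.contains p.1 = true <;> simp [h]
  rw [hsplit, PySem.List.foldl_prod_mk
        (f := fun (acc : List (String × String)) (p : String × String) =>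
          if pvRankB.contains p.1 then acc ++ [p] else acc)
        (g := fun (acc : List (String × String)) (p : String × String) =>
          if !pvRankB.contains p.1 then acc ++ [p] else acc),
      foldl_match_eq_filterMap,
      PySem.List.foldl_append_if_eq_filter, PySem.List.foldl_append_if_eq_filter,
      PySem.List.foldl_append_if_eq_filter]
  have hc1 : d.items.filter (fun p => pvRankB.contains p.1)
      = d.items.filter (fun p => pvPrioA.contains p.1) := by
    apply List.filter_congr; intro a _; rw [rank_contains_eq]
  have hc2 : d.items.filter (fun p => !pvRankB.contains p.1)
      = d.items.filter (fun p => !pvPrioA.contains p.1) := by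
    apply List.filter_congr; intro a _; rw [rank_contains_eq]
  rw [hc1, hc2]
  simp [sorted_filter_eq d hnd]

-- ===== VERDICT (by name: the statement is the Claim_ definition above) =====
theorem seed_pages_for_priority_spec : Claim_equal_seed_pages_for_priority := by
  intro existing _
  exact seed_main existing
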